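-- pv_equiv track=rewrite | github.com/Sarthak7106/Career-agent | agents/skill_gap_analyser.py | is_skill_match
-- ===== SOURCE A (Python) =====
-- SKILL_SYNONYMS = {
--     "communication": ["writing", "speaking", "presentation", "storytelling"],
--     "literacy": ["writing", "reading"],
--     "numeracy": ["math", "calculation"],
--     "teaching": ["mentoring", "explaining", "training"],
--     "programming": ["coding", "python", "java"],
--     "algorithm": ["algorithms", "problem solving"],
--     "creative": ["storytelling", "arts", "music"],
--     "management": ["coordination", "leadership"],
--     "assessment": ["evaluation", "testing"]
-- }
--
-- def is_skill_match(required, user_skills):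
--
--     required = required.lower()
--
--     for us in user_skills:
--
--         us = us.lower()
--
--         # ✅ Direct match
--         if required in us or us in required:
--             return True
--
--         # ✅ Synonym match
--         for key, synonyms in SKILL_SYNONYMS.items():
--
--             if key in required:
--                 if any(s in us for s in synonyms):
--                     return True
--
--             if key in us:
--                 if any(s in required for s in synonyms):
--                     return True
--
--     return False
-- ===== SOURCE B (Python) =====
-- SKILL_SYNONYMS = {
--     "communication": ["writing", "speaking", "presentation", "storytelling"],
--     "literacy": ["writing", "reading"],
--     "numeracy": ["math", "calculation"],
--     "teaching": ["mentoring", "explaining", "training"],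
--     "programming": ["coding", "python", "java"],
--     "algorithm": ["algorithms", "problem solving"],
--     "creative": ["storytelling", "arts", "music"],
--     "management": ["coordination", "leadership"],
--     "assessment": ["evaluation", "testing"]
-- }
--
-- def is_skill_match(required, user_skills):
--     # Three whole-list passes instead of one loop with nested dict scans:
--     # direct matches first, then the precomputed required-side synonyms,
--     # then the user-side synonym check. Only existence matters, so the
--     # traversal order does not change the result.
--     req = required.lower()
--     lowered = [us.lower() for us in user_skills]
--     if any(req in us or us in req for us in lowered):
--         return True
--     req_syns = [s for k, syns in SKILL_SYNONYMS.items() if k in req for s in syns]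
--     if any(any(s in us for us in lowered) for s in req_syns):
--         return True
--     return any(any(k in us and any(s in req for s in syns) for us in lowered)
--                for k, syns in SKILL_SYNONYMS.items())
-- ===== Notes on version B (the rewrite author's own statement) =====
-- stated objective: simpler
-- what changed: A's single loop over user_skills with an early return and a nested SKILL_SYNONYMS scan per skill is replaced by three separate whole-list existence passes (direct substring matches first, then a once-precomputed flat list of required-side synonyms, then the user-side synonym check), valid because only existence of a match is reported.
import Mathlib
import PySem

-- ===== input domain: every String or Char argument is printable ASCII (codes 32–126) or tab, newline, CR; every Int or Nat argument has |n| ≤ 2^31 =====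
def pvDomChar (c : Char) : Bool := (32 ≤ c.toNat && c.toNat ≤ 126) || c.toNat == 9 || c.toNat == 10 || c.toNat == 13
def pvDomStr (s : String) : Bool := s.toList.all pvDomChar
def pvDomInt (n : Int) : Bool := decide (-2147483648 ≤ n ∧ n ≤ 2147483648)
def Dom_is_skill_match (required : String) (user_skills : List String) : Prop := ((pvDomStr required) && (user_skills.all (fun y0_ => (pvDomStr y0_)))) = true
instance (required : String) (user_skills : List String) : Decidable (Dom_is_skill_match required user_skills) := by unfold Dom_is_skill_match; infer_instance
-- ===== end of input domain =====

-- B restructures A's single loop (direct check + nested dict scan per user skill, early return)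
-- into three whole-list passes with the required-side synonyms precomputed once; objective: simpler.

-- module-level constant SKILL_SYNONYMS (dict iterated in insertion order)
def SKILL_SYNONYMS : List (String × List String) :=
  [("communication", ["writing", "speaking", "presentation", "storytelling"]),
   ("literacy", ["writing", "reading"]),
   ("numeracy", ["math", "calculation"]),
   ("teaching", ["mentoring", "explaining", "training"]),
   ("programming", ["coding", "python", "java"]),
   ("algorithm", ["algorithms", "problem solving"]),
   ("creative", ["storytelling", "arts", "music"]),
   ("management", ["coordination", "leadership"]),
   ("assessment", ["evaluation", "testing"])]

-- ===== PORT A =====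
-- inner 'for key, synonyms in SKILL_SYNONYMS.items()' loop (returns true = Python's 'return True')
def pvASynLoop (required us : String) : List (String × List String) → Bool
  | [] => false
  | (key, synonyms) :: rest =>
    if PySem.Str.isIn key required && synonyms.any (fun s => PySem.Str.isIn s us) then true
    else if PySem.Str.isIn key us && synonyms.any (fun s => PySem.Str.isIn s required) then true
    else pvASynLoop required us rest

-- outer 'for us in user_skills' loop
def pvALoop (required : String) : List String → Bool
  | [] => false
  | us0 :: rest =>
    let us := PySem.Str.lower us0
    if PySem.Str.isIn required us || PySem.Str.isIn us required then true
    else if pvASynLoop required us SKILL_SYNONYMS then true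
    else pvALoop required rest

def is_skill_match (required : String) (user_skills : List String) : Bool :=
  pvALoop (PySem.Str.lower required) user_skills

-- ===== PORT B =====
def is_skill_match_alt (required : String) (user_skills : List String) : Bool :=
  let req := PySem.Str.lower required
  let lowered := user_skills.map PySem.Str.lower
  if lowered.any (fun us => PySem.Str.isIn req us || PySem.Str.isIn us req) then true
  else
    let reqSyns := (SKILL_SYNONYMS.filter (fun p => PySem.Str.isIn p.1 req)).flatMap (fun p => p.2)
    if reqSyns.any (fun s => lowered.any (fun us => PySem.Str.isIn s us)) then true
    else SKILL_SYNONYMS.any (fun p =>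
      lowered.any (fun us => PySem.Str.isIn p.1 us && p.2.any (fun s => PySem.Str.isIn s req)))

-- ===== PRECONDITION & SPEC =====
def Spec_is_skill_match (required : String) (user_skills : List String) (out : Bool) : Prop := out = is_skill_match_alt required user_skills
instance (required : String) (user_skills : List String) (out : Bool) : Decidable (Spec_is_skill_match required user_skills out) := by unfold Spec_is_skill_match; infer_instance

-- ===== CLAIM (what is proved, stated in full; the proofs are below) =====
def Claim_equal_is_skill_match : Prop := ∀ (required : String) (user_skills : List String), Dom_is_skill_match required user_skills → Spec_is_skill_match required user_skills (is_skill_match required user_skills)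

-- ===== LEMMAS AND PROOFS =====

-- A's inner dict loop is an existence check over the items
theorem pvASynLoop_eq_any (required us : String) (l : List (String × List String)) :
    pvASynLoop required us l =
      l.any (fun p => (PySem.Str.isIn p.1 required && p.2.any (fun s => PySem.Str.isIn s us))
                   || (PySem.Str.isIn p.1 us && p.2.any (fun s => PySem.Str.isIn s required))) := by
  induction l with
  | nil => rfl
  | cons hd tl ih =>
    obtain ⟨key, synonyms⟩ := hd
    simp only [pvASynLoop, List.any_cons, ih, Bool.if_true_left, Bool.or_assoc, Bool.decide_coe]

-- A's outer loop is an existence check over the (lowered) user skills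
theorem pvALoop_eq_any (required : String) (l : List String) :
    pvALoop required l =
      (l.map PySem.Str.lower).any (fun us =>
        (PySem.Str.isIn required us || PySem.Str.isIn us required)
        || pvASynLoop required us SKILL_SYNONYMS) := by
  induction l with
  | nil => rfl
  | cons hd tl ih =>
    simp only [pvALoop, List.map_cons, List.any_cons, ih, Bool.if_true_left, Bool.or_assoc, Bool.decide_coe]

theorem is_skill_match_spec : Claim_equal_is_skill_match := by
  intro required user_skills _
  unfold Spec_is_skill_match is_skill_match is_skill_match_alt
  rw [pvALoop_eq_any]
  simp only [pvASynLoop_eq_any]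
  generalize SKILL_SYNONYMS = L
  rw [Bool.eq_iff_iff]
  simp only [Bool.if_true_left, List.any_flatMap, List.any_filter, List.any_eq_true,
    List.mem_map, Bool.or_eq_true, Bool.and_eq_true, decide_eq_true_eq]
  constructor
  · rintro ⟨us, hus, hdir | ⟨p, hp, ⟨hkey, s, hs, hsu⟩ | ⟨hkey, hsyn⟩⟩⟩
    · exact Or.inl ⟨us, hus, hdir⟩
    · exact Or.inr (Or.inl ⟨p, hp, hkey, s, hs, us, hus, hsu⟩)
    · exact Or.inr (Or.inr ⟨p, hp, us, hus, hkey, hsyn⟩)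
  · rintro (⟨us, hus, hdir⟩ | ⟨p, hp, hkey, s, hs, us, hus, hsu⟩ | ⟨p, hp, us, hus, hkey, hsyn⟩)
    · exact ⟨us, hus, Or.inl hdir⟩
    · exact ⟨us, hus, Or.inr ⟨p, hp, Or.inl ⟨hkey, s, hs, hsu⟩⟩⟩
    · exact ⟨us, hus, Or.inr ⟨p, hp, Or.inr ⟨hkey, hsyn⟩⟩⟩
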